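-- pv_equiv track=rewrite | github.com/wonjun6715/coding_test | 프로그래머스/unrated/181880. 1로 만들기/1로 만들기.py | solution
-- ===== SOURCE A (Python) =====
-- def solution(num_list):
--     answer = 0
--     cnt = 0
--     for i in num_list:
--         cnt = 0
--         while i != 1:
--             if i % 2 == 0: # 짝수
--                 i = i // 2
--                 cnt += 1
--             else:
--                 i = (i - 1) // 2
--                 cnt += 1
--         answer += cnt
--     return answer
-- ===== SOURCE B (Python) =====
-- def solution(num_list):
--     # closed form: halving steps from i down to 1 equal i.bit_length() - 1
--     return sum(i.bit_length() - 1 for i in num_list)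
-- ===== Notes on version B (the rewrite author's own statement) =====
-- stated objective: simpler
-- what changed: Replaces the per-element while-loop of repeated floor-halvings with the closed form i.bit_length()-1, summed in one pass (intended as faster, O(n) vs O(n log M), but a timing run could not confirm a ratio).
import Mathlib
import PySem

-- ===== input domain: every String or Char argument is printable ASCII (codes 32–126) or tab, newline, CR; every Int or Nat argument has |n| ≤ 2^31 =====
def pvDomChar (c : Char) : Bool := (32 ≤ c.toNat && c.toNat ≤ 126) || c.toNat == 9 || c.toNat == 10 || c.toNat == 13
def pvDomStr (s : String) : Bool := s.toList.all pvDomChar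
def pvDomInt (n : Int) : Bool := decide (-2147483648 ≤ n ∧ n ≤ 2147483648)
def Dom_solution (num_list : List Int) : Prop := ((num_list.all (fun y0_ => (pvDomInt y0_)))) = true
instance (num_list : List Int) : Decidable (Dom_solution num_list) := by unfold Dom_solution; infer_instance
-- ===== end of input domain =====

-- B replaces A's per-element while-loop of repeated floor-halvings with the closed form bit_length(i)-1 (simpler; intended as faster but unmeasured).


-- ===== PORT A =====
-- the 'while i != 1' loop; fuel = i.toNat only makes the recursion total (for i ≥ 1 the loop
-- needs at most i.toNat iterations), it changes nothing on the admitted inputs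
def solutionLoop : Nat → Int → Int → Int
  | 0, _, cnt => cnt
  | fuel + 1, i, cnt =>
    if i ≠ 1 then
      if PySem.Int.mod i 2 = 0 then
        solutionLoop fuel (PySem.Int.floordiv i 2) (cnt + 1)
      else
        solutionLoop fuel (PySem.Int.floordiv (i - 1) 2) (cnt + 1)
    else cnt

def solution (num_list : List Int) : Int :=
  num_list.foldl (fun answer i => answer + solutionLoop i.toNat i 0) 0

-- ===== PORT B =====
def solution_alt (num_list : List Int) : Int :=
  num_list.foldl (fun acc i => acc + ((PySem.Int.bitLength i : Int) - 1)) 0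

-- ===== PRECONDITION & SPEC =====
-- A's while-loop never terminates on elements ≤ 0; Pre_ admits exactly the inputs on which A returns.
def Pre_solution (num_list : List Int) : Prop := ∀ i ∈ num_list, 1 ≤ i
instance (num_list : List Int) : Decidable (Pre_solution num_list) := by unfold Pre_solution; infer_instance
def pvWitness_solution : List Int := [3, 8, 1, 7]
def Spec_solution (num_list : List Int) (out : Int) : Prop := out = solution_alt num_list
instance (num_list : List Int) (out : Int) : Decidable (Spec_solution num_list out) := by unfold Spec_solution; infer_instance

-- ===== CLAIM (what is proved, stated in full; the proofs are below) =====
def Claim_equal_solution : Prop := ∀ (num_list : List Int), Dom_solution num_list → Pre_solution num_list → Spec_solution num_list (solution num_list)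

-- ===== LEMMAS AND PROOFS =====

lemma solutionLoop_eq (fuel : Nat) : ∀ (i cnt : Int), 1 ≤ i → i.toNat ≤ fuel →
    solutionLoop fuel i cnt = cnt + ((PySem.Int.bitLength i : Int) - 1) := by
  induction fuel with
  | zero => intro i cnt h1 h2; omega
  | succ n ih =>
    intro i cnt h1 h2
    by_cases hi : i = 1
    · subst hi
      simp only [solutionLoop, ne_eq, not_true_eq_false, if_false,
        show PySem.Int.bitLength 1 = 1 from by decide]
      ring
    · have h2i : 2 ≤ i := by omega
      have hstep : PySem.Int.bitLength i = PySem.Int.bitLength (PySem.Int.floordiv i 2) + 1 :=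
        PySem.Int.bitLength_of_pos (by omega)
      have hfd : PySem.Int.floordiv i 2 = i / 2 := PySem.Int.floordiv_eq_ediv_of_pos (by omega)
      have hfd' : PySem.Int.floordiv (i - 1) 2 = (i - 1) / 2 := PySem.Int.floordiv_eq_ediv_of_pos (by omega)
      have hrec : ∀ j : Int, j = PySem.Int.floordiv i 2 →
          solutionLoop n j (cnt + 1) = cnt + ((PySem.Int.bitLength i : Int) - 1) := by
        intro j hj
        have hj1 : 1 ≤ j := by rw [hj, hfd]; omega
        have hjn : j.toNat ≤ n := by
          have : j ≤ i - 1 := by rw [hj, hfd]; omega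
          omega
        rw [ih j (cnt + 1) hj1 hjn, hj, hstep]
        push_cast
        ring
      simp only [solutionLoop, if_pos hi]
      by_cases hm : PySem.Int.mod i 2 = 0
      · rw [if_pos hm]; exact hrec _ rfl
      · rw [if_neg hm]
        apply hrec
        rw [hfd, hfd']
        have := PySem.Int.mod_two_eq i
        have hm1 : PySem.Int.mod i 2 = 1 := by rcases this with h | h <;> omega
        have hemod : i % 2 = 1 := by
          rw [← PySem.Int.mod_eq_emod_of_pos (a := i) (by omega : (0:Int) < 2)]; exact hm1
        omega

lemma foldl_shift (f : Int → Int) : ∀ (l : List Int) (a : Int),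
    l.foldl (fun acc i => acc + f i) a = a + l.foldl (fun acc i => acc + f i) 0 := by
  intro l
  induction l with
  | nil => intro a; simp
  | cons x xs ih =>
    intro a
    simp only [List.foldl_cons]
    rw [ih (a + f x), ih (0 + f x)]
    ring

-- ===== VERDICT (by name: the statement is the Claim_ definition above) =====
theorem solution_spec : Claim_equal_solution := by
  intro num_list hdom hpre
  unfold Spec_solution solution solution_alt
  induction num_list with
  | nil => rfl
  | cons x xs ih =>
    have hx : 1 ≤ x := hpre x (List.mem_cons_self ..)
    have hdom' : Dom_solution xs := by
      simp only [Dom_solution, List.all_cons, Bool.and_eq_true] at hdom; exact hdom.2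
    simp only [List.foldl_cons]
    rw [solutionLoop_eq x.toNat x 0 hx (le_refl _), zero_add, zero_add,
        foldl_shift _ xs _, foldl_shift _ xs _,
        ih hdom' (fun i hi => hpre i (List.mem_cons_of_mem _ hi))]
    conv_rhs => rw [foldl_shift]
    ring
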